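-- pv_equiv track=rewrite | github.com/sungwoopark95/snowflake-on-python | sfpy.py | __pure_query
-- ===== SOURCE A (Python) =====
-- def __pure_query(sql):
--     raw_query_split = sql.split('\n')
--
--     wo_linebreak = []
--     for items in raw_query_split:
--         wo_linebreak += items.split(' ')
--
--     pure = [chunk for chunk in wo_linebreak if chunk != '']
--     query = ' '.join(pure)
--
--     return query
-- ===== SOURCE B (Python) =====
-- def __pure_query(sql):
--     out = []
--     pending = False
--     for ch in sql:
--         if ch == ' ' or ch == '\n':
--             pending = len(out) > 0
--         else:
--             if pending:
--                 out.append(' ')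
--                 pending = False
--             out.append(ch)
--     return ''.join(out)
-- ===== Notes on version B (the rewrite author's own statement) =====
-- stated objective: alternative
-- what changed: Replaces the split-on-newlines pass, per-line split-on-spaces accumulation, empty-chunk filter and join with a single character-level scan that copies non-separator characters and collapses each interior run of spaces/newlines to one space.
import Mathlib
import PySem

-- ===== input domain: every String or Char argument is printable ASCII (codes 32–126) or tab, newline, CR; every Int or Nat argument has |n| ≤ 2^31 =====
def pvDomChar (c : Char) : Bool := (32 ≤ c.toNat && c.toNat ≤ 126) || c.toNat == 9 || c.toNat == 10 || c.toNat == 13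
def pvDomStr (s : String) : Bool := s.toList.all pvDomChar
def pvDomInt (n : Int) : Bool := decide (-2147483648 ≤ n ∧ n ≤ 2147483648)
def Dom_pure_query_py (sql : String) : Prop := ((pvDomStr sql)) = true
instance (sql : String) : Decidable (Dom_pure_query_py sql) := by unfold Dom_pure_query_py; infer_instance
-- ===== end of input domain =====

-- B replaces A's split-on-newlines / split-on-spaces / filter / join pipeline with a single
-- character-level scan that collapses runs of ' '/'\n' to one interior space; same return value.

-- ===== PORT A =====
-- transliteration of A at the List Char level (PySem string ops are defined on List Char; exact)
def pure_query_py (sql : String) : String :=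
  let raw_query_split := PySem.Chars.splitOn sql.toList ['\n']
  let wo_linebreak := raw_query_split.foldl
    (fun acc items => acc ++ PySem.Chars.splitOn items [' ']) []
  let pure := wo_linebreak.filter (fun chunk => chunk != ([] : List Char))
  String.ofList (PySem.Chars.join [' '] pure)

-- ===== PORT B =====
-- B's loop body: st = (out, pending); pending = len(out) > 0 on a separator
def altStep (st : List Char × Bool) (ch : Char) : List Char × Bool :=
  if ch == ' ' || ch == '\n' then (st.1, decide (0 < st.1.length))
  else ((if st.2 then st.1 ++ [' '] else st.1) ++ [ch], false)

def pure_query_py_alt (sql : String) : String :=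
  String.ofList (sql.toList.foldl altStep ([], false)).1

-- ===== PRECONDITION & SPEC =====
def Spec_pure_query_py (sql : String) (out : String) : Prop := out = pure_query_py_alt sql
instance (sql : String) (out : String) : Decidable (Spec_pure_query_py sql out) := by unfold Spec_pure_query_py; infer_instance

-- ===== CLAIM (what is proved, stated in full; the proofs are below) =====
def Claim_equal_pure_query_py : Prop := ∀ (sql : String), Dom_pure_query_py sql → Spec_pure_query_py sql (pure_query_py sql)

-- ===== LEMMAS AND PROOFS =====

-- reference splitter: Python s.split(c) for a single-char separator
def mySplit (c : Char) (pre : List Char) : List Char → List (List Char)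
  | [] => [pre]
  | d :: t => if d == c then pre :: mySplit c [] t else mySplit c (pre ++ [d]) t

-- split on ' ' OR '\n' at once (fusion of A's two split passes)
def sp2 (pre : List Char) : List Char → List (List Char)
  | [] => [pre]
  | d :: t => if d == ' ' || d == '\n' then pre :: sp2 [] t else sp2 (pre ++ [d]) t

-- each non-empty chunk prefixed by one space, empty chunks dropped
def sepJoin (chunks : List (List Char)) : List Char :=
  chunks.flatMap (fun ck => if ck.isEmpty then [] else ' ' :: ck)

-- what B's loop emits once the output is non-empty
def emitB : Bool → List Char → List Char
  | _, [] => []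
  | pend, d :: t =>
    if d == ' ' || d == '\n' then emitB true t
    else (if pend then ' ' :: d :: emitB false t else d :: emitB false t)

-- what B's loop produces from the empty initial state
def leadB : List Char → List Char
  | [] => []
  | d :: t => if d == ' ' || d == '\n' then leadB t else d :: emitB false t

theorem go_single (c : Char) (l : List Char) : ∀ (fuel : Nat) (cur : List Char) (acc : List (List Char)),
    l.length ≤ fuel →
    PySem.Chars.splitOn.go [c] fuel l cur acc = acc.reverse ++ mySplit c cur.reverse l := by
  induction l with
  | nil =>
    intro fuel cur acc _
    cases fuel <;> simp [PySem.Chars.splitOn.go, mySplit]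
  | cons d t ih =>
    intro fuel cur acc h
    cases fuel with
    | zero => simp at h
    | succ f =>
      have hlen : t.length ≤ f := by simpa using h
      by_cases hd : d = c
      · have hp : (List.isPrefixOf [c] (d :: t)) = true := by
          subst hd; simp [List.isPrefixOf]
        simp only [PySem.Chars.splitOn.go, hp, if_true, List.length_cons, List.length_nil,
          List.drop_succ_cons, List.drop_zero]
        rw [ih f [] (cur.reverse :: acc) hlen]
        simp [mySplit, hd]
      · have hp : (List.isPrefixOf [c] (d :: t)) = false := by
          simp only [List.isPrefixOf, Bool.and_eq_false_iff, beq_eq_false_iff_ne, ne_eq]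
          exact Or.inl fun h' => hd h'.symm
        simp only [PySem.Chars.splitOn.go, hp, Bool.false_eq_true, if_false]
        rw [ih f (d :: cur) acc hlen]
        simp [mySplit, hd]

theorem splitOn_single (c : Char) (cs : List Char) :
    PySem.Chars.splitOn cs [c] = mySplit c [] cs := by
  simpa using go_single c cs (cs.length + 1) [] [] (by omega)
theorem mySplit_pre (c : Char) (l : List Char) : ∀ pre,
    ∃ h tl, mySplit c [] l = h :: tl ∧ mySplit c pre l = (pre ++ h) :: tl := by
  induction l with
  | nil => intro pre; exact ⟨[], [], by simp [mySplit]⟩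
  | cons d t ih =>
    intro pre
    by_cases hd : d = c
    · exact ⟨[], mySplit c [] t, by simp [mySplit, hd]⟩
    · obtain ⟨h, tl, h1, h2⟩ := ih (pre ++ [d])
      obtain ⟨h', tl', h1', h2'⟩ := ih [d]
      rw [h1] at h1'
      obtain ⟨rfl, rfl⟩ : h = h' ∧ tl = tl' := by simpa using h1'
      exact ⟨d :: h, tl, by simp [mySplit, hd, h2'], by simpa [mySplit, hd] using h2⟩

theorem sp2_pre (l : List Char) : ∀ pre,
    ∃ h tl, sp2 [] l = h :: tl ∧ sp2 pre l = (pre ++ h) :: tl := by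
  induction l with
  | nil => intro pre; exact ⟨[], [], by simp [sp2]⟩
  | cons d t ih =>
    intro pre
    by_cases hd : d = ' ' ∨ d = '\n'
    · refine ⟨[], sp2 [] t, ?_, ?_⟩ <;> rcases hd with h | h <;> simp [sp2, h]
    · rw [not_or] at hd
      obtain ⟨h, tl, h1, h2⟩ := ih (pre ++ [d])
      obtain ⟨h', tl', h1', h2'⟩ := ih [d]
      rw [h1] at h1'
      obtain ⟨rfl, rfl⟩ : h = h' ∧ tl = tl' := by simpa using h1'
      exact ⟨d :: h, tl, by simp [sp2, hd.1, hd.2, h2'], by simpa [sp2, hd.1, hd.2] using h2⟩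
theorem fuse (cs : List Char) :
    (mySplit '\n' [] cs).flatMap (fun item => mySplit ' ' [] item) = sp2 [] cs := by
  induction cs with
  | nil => simp [mySplit, sp2]
  | cons d t ih =>
    by_cases hn : d = '\n'
    · simp only [mySplit, sp2, hn, beq_self_eq_true, if_pos, List.flatMap_cons]
      simpa [mySplit] using ih
    · obtain ⟨h, tl, h1, h2⟩ := mySplit_pre '\n' t [d]
      rw [h1, List.flatMap_cons] at ih
      have lhs : mySplit '\n' [] (d :: t) = (d :: h) :: tl := by
        simpa [mySplit, hn] using h2
      rw [lhs, List.flatMap_cons]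
      by_cases hs : d = ' '
      · have fd : mySplit ' ' [] (d :: h) = [] :: mySplit ' ' [] h := by
          simp [mySplit, hs]
        rw [fd]
        have rhs : sp2 [] (d :: t) = [] :: sp2 [] t := by simp [sp2, hs]
        rw [rhs, ← ih]
        simp
      · obtain ⟨h', tl', g1, g2⟩ := mySplit_pre ' ' h [d]
        have fd : mySplit ' ' [] (d :: h) = (d :: h') :: tl' := by
          simpa [mySplit, hs] using g2
        obtain ⟨h2', tl2, s1, s2⟩ := sp2_pre t [d]
        have rhs : sp2 [] (d :: t) = (d :: h2') :: tl2 := by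
          simpa [sp2, hs, hn] using s2
        rw [fd, rhs]
        rw [g1] at ih
        rw [s1] at ih
        have e1 : h' = h2' := by simpa using congrArg List.head? ih
        have e2 : tl' ++ tl.flatMap (fun item => mySplit ' ' [] item) = tl2 := by
          simpa using congrArg List.tail ih
        simp [e1, e2]

theorem join_filter (tl : List (List Char)) : ∀ (c : List Char),
    PySem.Chars.join [' '] (c :: tl.filter (fun ck => ck != ([] : List Char))) = c ++ sepJoin tl := by
  induction tl with
  | nil => intro c; simp [sepJoin, PySem.Chars.join_singleton]
  | cons e tl ih =>
    intro c
    by_cases he : e = []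
    · simp [he, sepJoin, List.flatMap_cons] at *
      simpa [sepJoin] using ih c
    · simp only [List.filter_cons, sepJoin, List.flatMap_cons]
      rw [if_pos (by simpa using he)]
      rw [PySem.Chars.join_cons_cons]
      simp only [List.isEmpty_iff, if_neg he]
      have := ih e
      simp [sepJoin] at this
      simp [this]
theorem emit_spec (t : List Char) :
    (∀ h tl, sp2 [] t = h :: tl → emitB false t = h ++ sepJoin tl) ∧
      emitB true t = sepJoin (sp2 [] t) := by
  induction t with
  | nil =>
    constructor
    · intro h tl e
      obtain ⟨rfl, rfl⟩ : ([] : List Char) = h ∧ ([] : List (List Char)) = tl := by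
        simpa [sp2] using e
      simp [emitB, sepJoin]
    · simp [emitB, sp2, sepJoin]
  | cons d t ih =>
    by_cases hd : d = ' ' ∨ d = '\n'
    · have hsep : (d == ' ' || d == '\n') = true := by
        rcases hd with h | h <;> simp [h]
      have rhs : sp2 [] (d :: t) = [] :: sp2 [] t := by
        simp [sp2, hsep]
      constructor
      · intro h tl e
        rw [rhs] at e
        obtain ⟨rfl, rfl⟩ : ([] : List Char) = h ∧ sp2 [] t = tl := by simpa using e
        simp only [emitB, hsep, if_pos]
        simpa [sepJoin] using ih.2
      · rw [rhs]
        simp only [emitB, hsep, if_pos, sepJoin, List.flatMap_cons]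
        simpa [sepJoin] using ih.2
    · rw [not_or] at hd
      have hsep : (d == ' ' || d == '\n') = false := by simp [hd.1, hd.2]
      obtain ⟨h, tl, s1, s2⟩ := sp2_pre t [d]
      have rhs : sp2 [] (d :: t) = (d :: h) :: tl := by
        simpa [sp2, hsep] using s2
      have ef : emitB false t = h ++ sepJoin tl := ih.1 h tl s1
      constructor
      · intro h' tl' e
        rw [rhs] at e
        obtain ⟨rfl, rfl⟩ : d :: h = h' ∧ tl = tl' := by simpa using e
        simp [emitB, hsep, ef]
      · rw [rhs]
        simp [emitB, hsep, sepJoin, ef]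

theorem lead_spec (cs : List Char) :
    leadB cs = PySem.Chars.join [' '] ((sp2 [] cs).filter (fun ck => ck != ([] : List Char))) := by
  induction cs with
  | nil => simp [leadB, sp2, PySem.Chars.join_nil]
  | cons d t ih =>
    by_cases hd : d = ' ' ∨ d = '\n'
    · have hsep : (d == ' ' || d == '\n') = true := by
        rcases hd with h | h <;> simp [h]
      simp only [leadB, sp2, hsep, if_pos, List.filter_cons]
      simpa using ih
    · rw [not_or] at hd
      have hsep : (d == ' ' || d == '\n') = false := by simp [hd.1, hd.2]
      obtain ⟨h, tl, s1, s2⟩ := sp2_pre t [d]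
      have rhs : sp2 [] (d :: t) = (d :: h) :: tl := by
        simpa [sp2, hsep] using s2
      rw [rhs]
      simp only [List.filter_cons]
      rw [if_pos (by simp)]
      rw [join_filter tl (d :: h)]
      simp [leadB, hsep, (emit_spec t).1 h tl s1]

theorem foldB_emit (cs : List Char) : ∀ (out : List Char) (pend : Bool), out ≠ [] →
    (cs.foldl altStep (out, pend)).1 = out ++ emitB pend cs := by
  induction cs with
  | nil => intro out pend _; simp [emitB]
  | cons d t ih =>
    intro out pend hout
    by_cases hd : (d == ' ' || d == '\n') = true
    · have : altStep (out, pend) d = (out, true) := by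
        simp [altStep, hd, List.length_pos_iff, hout]
      simp only [List.foldl_cons, this, ih out true hout, emitB, hd, if_pos]
    · have hnd := hd
      simp only [Bool.not_eq_true] at hnd
      have : altStep (out, pend) d = ((if pend then out ++ [' '] else out) ++ [d], false) := by
        simp [altStep, hnd]
      rw [List.foldl_cons, this, ih _ false (by simp)]
      cases pend <;> simp [emitB, hnd]

theorem foldB_lead (cs : List Char) :
    (cs.foldl altStep ([], false)).1 = leadB cs := by
  induction cs with
  | nil => simp [leadB]
  | cons d t ih =>
    by_cases hd : (d == ' ' || d == '\n') = true
    · have : altStep ([], false) d = ([], false) := by simp [altStep, hd]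
      simp only [List.foldl_cons, this, ih, leadB, hd, if_pos]
    · have hnd := hd
      simp only [Bool.not_eq_true] at hnd
      have : altStep ([], false) d = ([d], false) := by simp [altStep, hnd]
      rw [List.foldl_cons, this, foldB_emit t [d] false (by simp)]
      simp [leadB, hnd]

-- ===== VERDICT (by name: the statement is the Claim_ definition above) =====
theorem pure_query_py_spec : Claim_equal_pure_query_py := by
  intro sql _
  unfold Spec_pure_query_py pure_query_py pure_query_py_alt
  dsimp only
  refine congrArg String.ofList ?_
  rw [foldB_lead, lead_spec, PySem.List.foldl_append_eq_flatMap, List.nil_append,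
    splitOn_single]
  have hcong : (mySplit '\n' [] sql.toList).flatMap (fun items => PySem.Chars.splitOn items [' '])
      = (mySplit '\n' [] sql.toList).flatMap (fun items => mySplit ' ' [] items) := by
    simp only [splitOn_single]
  rw [hcong, fuse]
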